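-- pv_equiv track=rewrite | github.com/sueszli/vector-database-benchmark | dataset/python-mutated/before-and-after-puzzle.py | beforeAndAfterPuzzles
-- ===== SOURCE A (Python) =====
-- import collections
--
-- def beforeAndAfterPuzzles(phrases):
--     if False:
--         return 10
--     '\n        :type phrases: List[str]\n        :rtype: List[str]\n        '
--     lookup = collections.defaultdict(list)
--     for (i, phrase) in enumerate(phrases):
--         right = phrase.rfind(' ')
--         word = phrase if right == -1 else phrase[right + 1:]
--         lookup[word].append(i)
--     result_set = set()
--     for (i, phrase) in enumerate(phrases):
--         left = phrase.find(' ')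
--         word = phrase if left == -1 else phrase[:left]
--         if word not in lookup:
--             continue
--         for j in lookup[word]:
--             if j == i:
--                 continue
--             result_set.add(phrases[j] + phrase[len(word):])
--     return sorted(result_set)
-- ===== SOURCE B (Python) =====
-- def beforeAndAfterPuzzles(phrases):
--     # One pass to precompute each phrase's first and last word, then a direct
--     # nested loop over all ordered index pairs (j, i), j != i -- no dict index.
--     n = len(phrases)
--     lasts = []
--     for p in phrases:
--         r = p.rfind(' ')
--         lasts.append(p if r == -1 else p[r + 1:])
--     firsts = []
--     for p in phrases:
--         l = p.find(' ')
--         firsts.append(p if l == -1 else p[:l])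
--     result_set = set()
--     for j in range(n):
--         for i in range(n):
--             if i != j and lasts[j] == firsts[i]:
--                 result_set.add(phrases[j] + phrases[i][len(firsts[i]):])
--     return sorted(result_set)
-- ===== Notes on version B (the rewrite author's own statement) =====
-- stated objective: alternative
-- what changed: Replaced A's defaultdict index from last word to phrase indices (build pass + lookup pass) by a single direct nested loop over all ordered index pairs (j, i), j != i, comparing last word of phrases[j] with first word of phrases[i]; same result set, then sorted.
import Mathlib
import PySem

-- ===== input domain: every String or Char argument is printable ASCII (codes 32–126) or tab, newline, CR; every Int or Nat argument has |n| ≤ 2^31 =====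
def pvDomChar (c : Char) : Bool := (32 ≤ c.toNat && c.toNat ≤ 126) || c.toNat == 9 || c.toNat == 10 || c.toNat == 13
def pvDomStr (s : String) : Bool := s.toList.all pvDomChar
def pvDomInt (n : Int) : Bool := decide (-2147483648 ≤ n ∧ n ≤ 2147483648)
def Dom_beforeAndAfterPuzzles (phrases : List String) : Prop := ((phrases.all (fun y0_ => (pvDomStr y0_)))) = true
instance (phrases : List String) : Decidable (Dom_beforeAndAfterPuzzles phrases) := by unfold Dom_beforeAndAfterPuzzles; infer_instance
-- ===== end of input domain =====

-- B replaces A's defaultdict last-word index by a direct nested loop over ordered index pairs (alternative decomposition, same result set).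

-- ===== PORT A =====
def beforeAndAfterPuzzles (phrases : List String) : List String :=
  let lookup : PySem.Dict String (List Int) :=
    (PySem.List.enumerate phrases 0).foldl (fun d p =>
      let right := PySem.Str.rfind p.2 " "
      let word := if right == -1 then p.2 else PySem.Str.slice p.2 (some (right + 1)) none
      d.modify word [] (fun l => l ++ [p.1])) PySem.Dict.empty
  let resultSet : PySem.Set String :=
    (PySem.List.enumerate phrases 0).foldl (fun s p =>
      let left := PySem.Str.find p.2 " "
      let word := if left == -1 then p.2 else PySem.Str.slice p.2 none (some left)
      if lookup.contains word then
        (lookup.getD word []).foldl (fun s j =>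
          if j == p.1 then s
          else PySem.Set.add s (PySem.List.pyGetD phrases j "" ++ PySem.Str.slice p.2 (some (PySem.Str.len word)) none)) s
      else s) PySem.Set.empty
  PySem.List.sorted resultSet (fun x => x) false

-- ===== PORT B =====
def beforeAndAfterPuzzles_alt (phrases : List String) : List String :=
  let n := PySem.List.len phrases
  let lasts : List String := phrases.foldl (fun acc p =>
    let r := PySem.Str.rfind p " "
    acc ++ [if r == -1 then p else PySem.Str.slice p (some (r + 1)) none]) []
  let firsts : List String := phrases.foldl (fun acc p =>
    let l := PySem.Str.find p " "
    acc ++ [if l == -1 then p else PySem.Str.slice p none (some l)]) []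
  let resultSet : PySem.Set String :=
    (PySem.List.pyRange 0 n 1).foldl (fun s j =>
      (PySem.List.pyRange 0 n 1).foldl (fun s i =>
        if i != j && (PySem.List.pyGetD lasts j "" == PySem.List.pyGetD firsts i "") then
          PySem.Set.add s (PySem.List.pyGetD phrases j "" ++
            PySem.Str.slice (PySem.List.pyGetD phrases i "")
              (some (PySem.Str.len (PySem.List.pyGetD firsts i ""))) none)
        else s) s) PySem.Set.empty
  PySem.List.sorted resultSet (fun x => x) false

-- ===== PRECONDITION & SPEC =====
def Spec_beforeAndAfterPuzzles (phrases : List String) (out : List String) : Prop := out = beforeAndAfterPuzzles_alt phrases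
instance (phrases : List String) (out : List String) : Decidable (Spec_beforeAndAfterPuzzles phrases out) := by unfold Spec_beforeAndAfterPuzzles; infer_instance

-- ===== CLAIM (what is proved, stated in full; the proofs are below) =====
def Claim_equal_beforeAndAfterPuzzles : Prop := ∀ (phrases : List String), Dom_beforeAndAfterPuzzles phrases → Spec_beforeAndAfterPuzzles phrases (beforeAndAfterPuzzles phrases)

-- ===== LEMMAS AND PROOFS =====

-- last word of a phrase (A's rfind logic) and first word (A's find logic)
def pvLW (p : String) : String :=
  if PySem.Str.rfind p " " == -1 then p else PySem.Str.slice p (some (PySem.Str.rfind p " " + 1)) none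
def pvFW (p : String) : String :=
  if PySem.Str.find p " " == -1 then p else PySem.Str.slice p none (some (PySem.Str.find p " "))
def pvSuf (p : String) : String := PySem.Str.slice p (some (PySem.Str.len (pvFW p))) none

-- the common characterisation of both result sets
def pvGood (phrases : List String) (x : String) : Prop :=
  ∃ (j i : Nat) (hj : j < phrases.length) (hi : i < phrases.length),
    j ≠ i ∧ pvLW phrases[j] = pvFW phrases[i] ∧ x = phrases[j] ++ pvSuf phrases[i]

-- A's lookup-building step, named
def pvLStep (d : PySem.Dict String (List Int)) (p : Int × String) : PySem.Dict String (List Int) :=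
  d.modify (pvLW p.2) [] (fun l => l ++ [p.1])

def pvLookup (phrases : List String) : PySem.Dict String (List Int) :=
  (PySem.List.enumerate phrases 0).foldl pvLStep PySem.Dict.empty

def pvSetA (phrases : List String) : PySem.Set String :=
  (PySem.List.enumerate phrases 0).foldl (fun s p =>
    if (pvLookup phrases).contains (pvFW p.2) then
      ((pvLookup phrases).getD (pvFW p.2) []).foldl (fun s j =>
        if j == p.1 then s
        else PySem.Set.add s (PySem.List.pyGetD phrases j "" ++ pvSuf p.2)) s
    else s) PySem.Set.empty

def pvSetB (phrases : List String) : PySem.Set String :=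
  (PySem.List.pyRange 0 (PySem.List.len phrases) 1).foldl (fun s j =>
    (PySem.List.pyRange 0 (PySem.List.len phrases) 1).foldl (fun s i =>
      if i != j && (PySem.List.pyGetD (phrases.map pvLW) j "" == PySem.List.pyGetD (phrases.map pvFW) i "") then
        PySem.Set.add s (PySem.List.pyGetD phrases j "" ++
          PySem.Str.slice (PySem.List.pyGetD phrases i "")
            (some (PySem.Str.len (PySem.List.pyGetD (phrases.map pvFW) i ""))) none)
      else s) s) PySem.Set.empty

theorem pv_foldl_append_map {α β : Type} (f : α → β) (l : List α) :
    ∀ acc : List β, l.foldl (fun acc p => acc ++ [f p]) acc = acc ++ l.map f := by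
  induction l with
  | nil => simp
  | cons p t ih => intro acc; simp [List.foldl_cons, ih]

theorem pvA_eq (phrases : List String) :
    beforeAndAfterPuzzles phrases = PySem.List.sorted (pvSetA phrases) (fun x => x) false := rfl

theorem pvB_eq (phrases : List String) :
    beforeAndAfterPuzzles_alt phrases = PySem.List.sorted (pvSetB phrases) (fun x => x) false := by
  unfold beforeAndAfterPuzzles_alt pvSetB
  rw [pv_foldl_append_map, pv_foldl_append_map]
  rfl

theorem pv_mem_foldl_iff {β : Type} (step : PySem.Set String → β → PySem.Set String)
    (P : β → String → Prop) (h : ∀ s b x, x ∈ step s b ↔ x ∈ s ∨ P b x) :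
    ∀ (l : List β) (s : PySem.Set String) (x : String),
      x ∈ l.foldl step s ↔ x ∈ s ∨ ∃ b ∈ l, P b x := by
  intro l
  induction l with
  | nil => simp
  | cons b t ih =>
    intro s x
    simp [List.foldl_cons, ih, h]
    tauto

theorem pv_mem_inner (js : List Int) (i : Int) (g : Int → String) (s : PySem.Set String) (x : String) :
    x ∈ js.foldl (fun s j => if j == i then s else PySem.Set.add s (g j)) s ↔
      x ∈ s ∨ ∃ j ∈ js, j ≠ i ∧ x = g j := by
  refine pv_mem_foldl_iff _ (fun j x => j ≠ i ∧ x = g j) ?_ js s x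
  intro s j x
  by_cases hji : j = i <;> simp [hji, PySem.Set.mem_add]

theorem pv_lookup_getD (l : List (Int × String)) (d : PySem.Dict String (List Int)) (w : String) :
    (l.foldl pvLStep d).getD w [] = d.getD w [] ++ (l.filter (fun p => pvLW p.2 == w)).map (·.1) := by
  induction l generalizing d with
  | nil => simp
  | cons p t ih =>
    simp only [List.foldl_cons, ih, List.filter_cons]
    by_cases hw : pvLW p.2 = w
    · simp [pvLStep, hw]
    · simp [pvLStep, PySem.Dict.getD_modify, hw, Ne.symm hw]

theorem pv_getD_of_not_contains (d : PySem.Dict String (List Int)) (w : String)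
    (h : d.contains w = false) : d.getD w [] = [] := by
  have h2 := (PySem.Dict.get?_eq_none_iff_contains d w).2 h
  show (d.get? w).getD [] = []
  rw [h2]
  rfl

theorem pv_lookup_char (phrases : List String) (w : String) :
    (pvLookup phrases).getD w [] =
      ((PySem.List.enumerate phrases 0).filter (fun p => pvLW p.2 == w)).map (·.1) := by
  have : (PySem.Dict.empty : PySem.Dict String (List Int)).getD w [] = [] := rfl
  simpa [pvLookup, this] using pv_lookup_getD (PySem.List.enumerate phrases 0) PySem.Dict.empty w

theorem pv_memA (phrases : List String) (x : String) :
    x ∈ pvSetA phrases ↔ pvGood phrases x := by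
  have hmain :
      x ∈ pvSetA phrases ↔ x ∈ (PySem.Set.empty : PySem.Set String) ∨ ∃ p ∈ PySem.List.enumerate phrases 0,
        (pvLookup phrases).contains (pvFW p.2) = true ∧
          ∃ j ∈ (pvLookup phrases).getD (pvFW p.2) [], j ≠ p.1 ∧
            x = PySem.List.pyGetD phrases j "" ++ pvSuf p.2 := by
    unfold pvSetA
    refine pv_mem_foldl_iff _
      (fun (p : Int × String) x => (pvLookup phrases).contains (pvFW p.2) = true ∧
        ∃ j ∈ (pvLookup phrases).getD (pvFW p.2) [], j ≠ p.1 ∧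
          x = PySem.List.pyGetD phrases j "" ++ pvSuf p.2) ?_ _ _ x
    intro s p y
    by_cases hc : (pvLookup phrases).contains (pvFW p.2) = true
    · simpa [hc] using pv_mem_inner ((pvLookup phrases).getD (pvFW p.2) []) p.1
        (fun j => PySem.List.pyGetD phrases j "" ++ pvSuf p.2) s y
    · simp [hc]
  rw [hmain]
  simp only [PySem.Set.empty, List.not_mem_nil, false_or]
  constructor
  · rintro ⟨p, hp, -, j, hj, hji, hx⟩
    obtain ⟨i, hi, rfl⟩ := (PySem.List.mem_enumerate_iff _ _ _).1 hp
    rw [pv_lookup_char] at hj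
    obtain ⟨q, hq, hjq⟩ := List.mem_map.1 hj
    obtain ⟨hq2, hlw⟩ := List.mem_filter.1 hq
    obtain ⟨k, hk, rfl⟩ := (PySem.List.mem_enumerate_iff _ _ _).1 hq2
    simp only [beq_iff_eq] at hlw
    refine ⟨k, i, hk, hi, ?_, hlw, ?_⟩
    · intro hki; apply hji; subst hjq; simp [hki]
    · subst hjq
      rw [hx]
      simp [PySem.List.pyGetD_natCast, List.getD_eq_getElem?_getD, hk]
  · rintro ⟨k, i, hk, hi, hki, hlw, rfl⟩
    have hmem : ((k : Int)) ∈ (pvLookup phrases).getD (pvFW phrases[i]) [] := by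
      rw [pv_lookup_char]
      refine List.mem_map.2 ⟨((0 : Int) + k, phrases[k]), List.mem_filter.2 ⟨?_, by simpa using hlw⟩, by simp⟩
      exact (PySem.List.mem_enumerate_iff _ _ _).2 ⟨k, hk, rfl⟩
    have hcont : (pvLookup phrases).contains (pvFW phrases[i]) = true := by
      by_contra hc
      rw [pv_getD_of_not_contains _ _ (by simpa using hc)] at hmem
      simp at hmem
    refine ⟨((0 : Int) + i, phrases[i]), (PySem.List.mem_enumerate_iff _ _ _).2 ⟨i, hi, rfl⟩,
      hcont, (k : Int), hmem, by simpa using fun h => hki (by exact_mod_cast h), ?_⟩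
    simp [PySem.List.pyGetD_natCast, List.getD_eq_getElem?_getD, hk]

theorem pv_memB (phrases : List String) (x : String) :
    x ∈ pvSetB phrases ↔ pvGood phrases x := by
  have hinner : ∀ (j : Int) (s : PySem.Set String) (y : String),
      y ∈ (PySem.List.pyRange 0 (PySem.List.len phrases) 1).foldl (fun s i =>
        if i != j && (PySem.List.pyGetD (phrases.map pvLW) j "" == PySem.List.pyGetD (phrases.map pvFW) i "") then
          PySem.Set.add s (PySem.List.pyGetD phrases j "" ++
            PySem.Str.slice (PySem.List.pyGetD phrases i "")
              (some (PySem.Str.len (PySem.List.pyGetD (phrases.map pvFW) i ""))) none)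
        else s) s ↔
      y ∈ s ∨ ∃ i ∈ PySem.List.pyRange 0 (PySem.List.len phrases) 1, i ≠ j ∧
        PySem.List.pyGetD (phrases.map pvLW) j "" = PySem.List.pyGetD (phrases.map pvFW) i "" ∧
        y = PySem.List.pyGetD phrases j "" ++
          PySem.Str.slice (PySem.List.pyGetD phrases i "")
            (some (PySem.Str.len (PySem.List.pyGetD (phrases.map pvFW) i ""))) none := by
    intro j s y
    refine pv_mem_foldl_iff _
      (fun (i : Int) z => i ≠ j ∧
        PySem.List.pyGetD (phrases.map pvLW) j "" = PySem.List.pyGetD (phrases.map pvFW) i "" ∧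
        z = PySem.List.pyGetD phrases j "" ++
          PySem.Str.slice (PySem.List.pyGetD phrases i "")
            (some (PySem.Str.len (PySem.List.pyGetD (phrases.map pvFW) i ""))) none) ?_ _ _ y
    intro s i z
    by_cases hij : i = j
    · simp [hij]
    by_cases hw : PySem.List.pyGetD (phrases.map pvLW) j "" = PySem.List.pyGetD (phrases.map pvFW) i ""
    · simp [hij, hw, PySem.Set.mem_add]
    · simp [hij, hw]
  have hmain :
      x ∈ pvSetB phrases ↔ x ∈ (PySem.Set.empty : PySem.Set String) ∨
        ∃ j ∈ PySem.List.pyRange 0 (PySem.List.len phrases) 1,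
          ∃ i ∈ PySem.List.pyRange 0 (PySem.List.len phrases) 1, i ≠ j ∧
            PySem.List.pyGetD (phrases.map pvLW) j "" = PySem.List.pyGetD (phrases.map pvFW) i "" ∧
            x = PySem.List.pyGetD phrases j "" ++
              PySem.Str.slice (PySem.List.pyGetD phrases i "")
                (some (PySem.Str.len (PySem.List.pyGetD (phrases.map pvFW) i ""))) none := by
    unfold pvSetB
    refine pv_mem_foldl_iff _
      (fun (j : Int) y => ∃ i ∈ PySem.List.pyRange 0 (PySem.List.len phrases) 1, i ≠ j ∧
        PySem.List.pyGetD (phrases.map pvLW) j "" = PySem.List.pyGetD (phrases.map pvFW) i "" ∧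
        y = PySem.List.pyGetD phrases j "" ++
          PySem.Str.slice (PySem.List.pyGetD phrases i "")
            (some (PySem.Str.len (PySem.List.pyGetD (phrases.map pvFW) i ""))) none) ?_ _ _ x
    intro s j y
    exact hinner j s y
  rw [hmain]
  simp only [PySem.Set.empty, List.not_mem_nil, false_or]
  constructor
  · rintro ⟨j, hj, i, hi, hij, hw, rfl⟩
    rw [PySem.List.mem_pyRange_one] at hj hi
    simp only [PySem.List.len] at hj hi
    have hj' : j.toNat < phrases.length := by omega
    have hi' : i.toNat < phrases.length := by omega
    have ej : PySem.List.pyGetD phrases j "" = phrases[j.toNat] :=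
      PySem.List.pyGetD_eq_getElem _ _ (by omega) (by omega)
    have ei : PySem.List.pyGetD phrases i "" = phrases[i.toNat] :=
      PySem.List.pyGetD_eq_getElem _ _ (by omega) (by omega)
    have elj : PySem.List.pyGetD (phrases.map pvLW) j "" = pvLW phrases[j.toNat] := by
      rw [PySem.List.pyGetD_eq_getElem _ _ (by omega) (by simpa using (by omega : j < (phrases.length : Int)))]
      simp
    have efi : PySem.List.pyGetD (phrases.map pvFW) i "" = pvFW phrases[i.toNat] := by
      rw [PySem.List.pyGetD_eq_getElem _ _ (by omega) (by simpa using (by omega : i < (phrases.length : Int)))]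
      simp
    refine ⟨j.toNat, i.toNat, hj', hi', by omega, ?_, ?_⟩
    · rw [← elj, ← efi]; exact hw
    · rw [ej, ei, efi]; rfl
  · rintro ⟨j, i, hj, hi, hij, hw, rfl⟩
    have ej : PySem.List.pyGetD phrases (j : Int) "" = phrases[j] := by
      rw [PySem.List.pyGetD_natCast]; exact List.getD_eq_getElem _ _ hj
    have ei : PySem.List.pyGetD phrases (i : Int) "" = phrases[i] := by
      rw [PySem.List.pyGetD_natCast]; exact List.getD_eq_getElem _ _ hi
    have elj : PySem.List.pyGetD (phrases.map pvLW) (j : Int) "" = pvLW phrases[j] := by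
      rw [PySem.List.pyGetD_natCast]
      rw [List.getD_eq_getElem _ _ (by simpa using hj)]
      simp
    have efi : PySem.List.pyGetD (phrases.map pvFW) (i : Int) "" = pvFW phrases[i] := by
      rw [PySem.List.pyGetD_natCast]
      rw [List.getD_eq_getElem _ _ (by simpa using hi)]
      simp
    refine ⟨(j : Int), ?_, (i : Int), ?_, by exact_mod_cast fun h => hij (by exact_mod_cast h.symm), ?_, ?_⟩
    · rw [PySem.List.mem_pyRange_one]; simp [PySem.List.len]; omega
    · rw [PySem.List.mem_pyRange_one]; simp [PySem.List.len]; omega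
    · rw [elj, efi]; exact hw
    · rw [ej, ei, efi]; rfl

theorem pv_nodup_foldl {β : Type} (step : PySem.Set String → β → PySem.Set String)
    (h : ∀ s b, List.Nodup s → List.Nodup (step s b)) :
    ∀ (l : List β) (s : PySem.Set String), List.Nodup s → List.Nodup (l.foldl step s) := by
  intro l
  induction l with
  | nil => intro s hs; simpa using hs
  | cons b t ih => intro s hs; exact ih _ (h s b hs)

theorem pv_nodupA (phrases : List String) : List.Nodup (pvSetA phrases) := by
  refine pv_nodup_foldl _ ?_ _ _ List.nodup_nil
  intro s p hs
  split
  · refine pv_nodup_foldl _ ?_ _ _ hs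
    intro s j hs'
    split
    · exact hs'
    · exact PySem.Set.nodup_add _ _ hs'
  · exact hs

theorem pv_nodupB (phrases : List String) : List.Nodup (pvSetB phrases) := by
  refine pv_nodup_foldl _ ?_ _ _ List.nodup_nil
  intro s j hs
  refine pv_nodup_foldl _ ?_ _ _ hs
  intro s i hs'
  split
  · exact PySem.Set.nodup_add _ _ hs'
  · exact hs'

-- ===== VERDICT (by name: the statement is the Claim_ definition above) =====
theorem beforeAndAfterPuzzles_spec : Claim_equal_beforeAndAfterPuzzles := by
  intro phrases _
  unfold Spec_beforeAndAfterPuzzles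
  rw [pvA_eq, pvB_eq]
  exact (PySem.List.sorted_id_eq_sorted_id_iff_perm _ _).2
    ((List.perm_ext_iff_of_nodup (pv_nodupA phrases) (pv_nodupB phrases)).2
      (fun a => (pv_memA phrases a).trans (pv_memB phrases a).symm))
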